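-- pv_equiv track=rewrite | github.com/najeh-halawani/Automated-Web-Tracking-Detection-and-Privacy-Compliance-Analyzer | analysis/har_to_results.py | lookup_disconnect_category
-- ===== SOURCE A (Python) =====
-- from typing import Dict, Iterable, List, Optional, Tuple
--
-- def lookup_disconnect_category(host: Optional[str], lookup: Dict[str, str]) -> Optional[str]:
--     if not host:
--         return None
--     host = host.lower()
--     parts = host.split(".")
--     for idx in range(len(parts)):
--         candidate = ".".join(parts[idx:])
--         if candidate in lookup:
--             return lookup[candidate]
--     return None
-- ===== SOURCE B (Python) =====
-- from typing import Dict, Optional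
--
-- def lookup_disconnect_category(host: Optional[str], lookup: Dict[str, str]) -> Optional[str]:
--     if not host:
--         return None
--     result = None
--     candidate = None
--     for label in reversed(host.lower().split(".")):
--         candidate = label if candidate is None else label + "." + candidate
--         if candidate in lookup:
--             result = lookup[candidate]
--     return result
-- ===== Notes on version B (the rewrite author's own statement) =====
-- stated objective: alternative
-- what changed: B walks the labels right-to-left, growing the candidate suffix incrementally by prepending one label at a time and overwriting the result on every hit (last hit = longest match), instead of A's left-to-right loop that re-joins each suffix from scratch and returns on the first hit.
import Mathlib
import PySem

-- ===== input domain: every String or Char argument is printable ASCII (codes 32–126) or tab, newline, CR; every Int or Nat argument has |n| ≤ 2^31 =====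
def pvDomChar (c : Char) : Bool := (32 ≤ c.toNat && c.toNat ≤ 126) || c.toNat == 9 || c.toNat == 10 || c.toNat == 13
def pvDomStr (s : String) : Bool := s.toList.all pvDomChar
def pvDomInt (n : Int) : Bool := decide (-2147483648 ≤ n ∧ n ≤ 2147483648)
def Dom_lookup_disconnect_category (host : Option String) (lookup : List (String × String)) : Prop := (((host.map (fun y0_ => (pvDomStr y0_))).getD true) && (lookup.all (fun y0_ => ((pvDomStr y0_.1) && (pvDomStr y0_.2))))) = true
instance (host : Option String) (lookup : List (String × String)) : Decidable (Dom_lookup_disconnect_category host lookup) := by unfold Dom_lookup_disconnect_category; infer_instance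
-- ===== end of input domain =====

-- B walks the labels right-to-left, growing the candidate suffix incrementally and
-- overwriting the result on every hit, instead of A's left-to-right first-hit loop
-- that re-joins each suffix from scratch (objective: alternative decomposition).


-- ===== PORT A =====
-- first-match lookup in the association list (dict convention: lookup = first match)
def pvDictGet (lookup : List (String × String)) (k : String) : Option String :=
  (lookup.find? (fun p => p.1 == k)).map (·.2)

-- A's loop over idx: candidate = ".".join(parts[idx:]); return on first hit
def pvALoop (lookup : List (String × String)) : List String → Option String
  | [] => none
  | x :: xs =>
    match pvDictGet lookup (PySem.Str.join "." (x :: xs)) with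
    | some v => some v
    | none => pvALoop lookup xs

def lookup_disconnect_category (host : Option String) (lookup : List (String × String)) : Option String :=
  match host with
  | none => none
  | some s =>
    if s = "" then none
    else pvALoop lookup (((PySem.Str.split? (PySem.Str.lower s) ".").getD []))

-- ===== PORT B =====
-- one step of B's loop: prepend the label to the growing candidate, overwrite result on a hit
def pvBStep (lookup : List (String × String)) (st : Option String × Option String) (label : String) :
    Option String × Option String :=
  let c := match st.1 with
    | none => label
    | some c0 => label ++ "." ++ c0
  (some c, match pvDictGet lookup c with
    | some v => some v
    | none => st.2)

def lookup_disconnect_category_alt (host : Option String) (lookup : List (String × String)) : Option String :=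
  match host with
  | none => none
  | some s =>
    if s = "" then none
    else ((((PySem.Str.split? (PySem.Str.lower s) ".").getD [])).reverse.foldl (pvBStep lookup) (none, none)).2

-- ===== PRECONDITION & SPEC =====
def Spec_lookup_disconnect_category (host : Option String) (lookup : List (String × String)) (out : Option String) : Prop := out = lookup_disconnect_category_alt host lookup
instance (host : Option String) (lookup : List (String × String)) (out : Option String) : Decidable (Spec_lookup_disconnect_category host lookup out) := by unfold Spec_lookup_disconnect_category; infer_instance

-- ===== CLAIM (what is proved, stated in full; the proofs are below) =====
def Claim_equal_lookup_disconnect_category : Prop := ∀ (host : Option String) (lookup : List (String × String)), Dom_lookup_disconnect_category host lookup → Spec_lookup_disconnect_category host lookup (lookup_disconnect_category host lookup)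

-- ===== LEMMAS AND PROOFS =====
theorem pv_join_singleton (x : String) : PySem.Str.join "." [x] = x := by
  apply String.toList_injective
  simp [PySem.Chars.join_singleton]

theorem pv_join_cons (x y : String) (ys : List String) :
    PySem.Str.join "." (x :: y :: ys) = x ++ "." ++ PySem.Str.join "." (y :: ys) := by
  apply String.toList_injective
  simp [PySem.Chars.join_cons_cons]

-- the candidate B has built after consuming a (reversed) suffix l: none iff l = []
def pvCandOf : List String → Option String
  | [] => none
  | l@(_ :: _) => some (PySem.Str.join "." l)

theorem pvB_invariant (lookup : List (String × String)) (l : List String) :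
    l.reverse.foldl (pvBStep lookup) (none, none) = (pvCandOf l, pvALoop lookup l) := by
  induction l with
  | nil => simp [pvCandOf, pvALoop]
  | cons x xs ih =>
    rw [List.reverse_cons, List.foldl_append, ih]
    cases xs with
    | nil => simp [pvBStep, pvCandOf, pvALoop, pv_join_singleton]
    | cons y ys =>
      simp only [pvBStep, pvCandOf, pvALoop, List.foldl_cons, List.foldl_nil,
        pv_join_cons x y ys]

-- ===== VERDICT (by name: the statement is the Claim_ definition above) =====
theorem lookup_disconnect_category_spec : Claim_equal_lookup_disconnect_category := by
  intro host lookup _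
  unfold Spec_lookup_disconnect_category lookup_disconnect_category lookup_disconnect_category_alt
  cases host with
  | none => rfl
  | some s =>
    by_cases h : s = ""
    · simp [h]
    · show (if s = "" then none else _) = (if s = "" then none else _)
      rw [if_neg h, if_neg h, pvB_invariant]
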